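-- pv_equiv track=rewrite | github.com/Viciooo/WDI_zestawy | inne/zadania_z_wyk.py | licz_pary
-- ===== SOURCE A (Python) =====
-- def licz_pary(n,t):
--     cnt = 0
--     N = len(t)
--     for i in range(N*N-1):
--         for j in range(i+1,N*N):
--             if t[i%N][i//N]*t[j%N][j//N] == n:
--                 cnt += 1
--     return cnt
-- ===== SOURCE B (Python) =====
-- def licz_pary(n, t):
--     N = len(t)
--     if N < 2:
--         return 0
--     cnt = 0
--     total = 0
--     seen = {}
--     for c in range(N):
--         for r in range(N):
--             x = t[r][c]
--             if x == 0:
--                 if n == 0: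
--                     cnt += total
--             elif n % x == 0:
--                 cnt += seen.get(n // x, 0)
--             seen[x] = seen.get(x, 0) + 1
--             total += 1
--     return cnt
-- ===== Notes on version B (the rewrite author's own statement) =====
-- stated objective: faster
-- what changed: Replaces the O(N^4) double loop over all linearized index pairs by a single O(N^2) pass that keeps a running count of previously seen values in a dict and, for each new element x, adds the number of earlier elements equal to n//x (handling x == 0 via a running total).
import Mathlib
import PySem

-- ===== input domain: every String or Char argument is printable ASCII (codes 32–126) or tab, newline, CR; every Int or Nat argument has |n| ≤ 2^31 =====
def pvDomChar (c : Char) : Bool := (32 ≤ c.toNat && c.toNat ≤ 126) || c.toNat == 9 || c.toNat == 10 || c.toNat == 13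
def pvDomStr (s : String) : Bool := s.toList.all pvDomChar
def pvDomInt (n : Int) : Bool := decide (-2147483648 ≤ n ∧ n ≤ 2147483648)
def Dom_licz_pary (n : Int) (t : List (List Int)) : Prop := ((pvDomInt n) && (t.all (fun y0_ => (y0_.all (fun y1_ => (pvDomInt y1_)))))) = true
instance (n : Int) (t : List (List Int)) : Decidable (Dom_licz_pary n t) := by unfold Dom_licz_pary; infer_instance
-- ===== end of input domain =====

-- ===== PORT A =====
-- B replaces A's quadruple-nested index-pair scan by one pass over the grid with a dict of value counts.
def licz_pary (n : Int) (t : List (List Int)) : Int :=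
  let N : Int := PySem.List.len t
  (PySem.List.pyRange 0 (N * N - 1) 1).foldl (fun cnt i =>
    (PySem.List.pyRange (i + 1) (N * N) 1).foldl (fun cnt j =>
      if PySem.List.pyGetD (PySem.List.pyGetD t (PySem.Int.mod i N) []) (PySem.Int.floordiv i N) 0 *
         PySem.List.pyGetD (PySem.List.pyGetD t (PySem.Int.mod j N) []) (PySem.Int.floordiv j N) 0 = n
      then cnt + 1 else cnt) cnt) 0

-- ===== PORT B =====
-- loop body of B: update the state (cnt, total, seen) with the next grid element x
def pvStep (n : Int) (st : Int × Int × PySem.Dict Int Int) (x : Int) : Int × Int × PySem.Dict Int Int :=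
  let cnt := if x = 0 then (if n = 0 then st.1 + st.2.1 else st.1)
             else if PySem.Int.mod n x = 0 then st.1 + st.2.2.getD (PySem.Int.floordiv n x) 0 else st.1
  (cnt, st.2.1 + 1, st.2.2.insert x (st.2.2.getD x 0 + 1))

def licz_pary_alt (n : Int) (t : List (List Int)) : Int :=
  let N : Int := PySem.List.len t
  if N < 2 then 0
  else
    ((PySem.List.pyRange 0 N 1).foldl (fun st c =>
      (PySem.List.pyRange 0 N 1).foldl (fun st r =>
        pvStep n st (PySem.List.pyGetD (PySem.List.pyGetD t r []) c 0)) st)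
      (0, 0, PySem.Dict.empty)).1

-- ===== PRECONDITION & SPEC =====
-- Pre_ excludes exactly the inputs on which both Pythons raise IndexError: a grid with at
-- least 2 rows, some row shorter than the number of rows.
def Pre_licz_pary (n : Int) (t : List (List Int)) : Prop :=
  t.length ≤ 1 ∨ ∀ row ∈ t, t.length ≤ row.length
instance (n : Int) (t : List (List Int)) : Decidable (Pre_licz_pary n t) := by
  unfold Pre_licz_pary; infer_instance
def pvWitness_licz_pary : Int × List (List Int) := (6, [[1, 2], [3, 6]])

def Spec_licz_pary (n : Int) (t : List (List Int)) (out : Int) : Prop := out = licz_pary_alt n t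
instance (n : Int) (t : List (List Int)) (out : Int) : Decidable (Spec_licz_pary n t out) := by
  unfold Spec_licz_pary; infer_instance

-- ===== CLAIM (what is proved, stated in full; the proofs are below) =====
def Claim_equal_licz_pary : Prop := ∀ (n : Int) (t : List (List Int)),
  Dom_licz_pary n t → Pre_licz_pary n t → Spec_licz_pary n t (licz_pary n t)

-- ===== LEMMAS AND PROOFS =====

-- number of (earlier, later) pairs in the list whose product is n
def pvBrute (n : Int) : List Int → Int
  | [] => 0
  | x :: ys => (ys.countP (fun y => decide (x * y = n)) : Int) + pvBrute n ys

-- the column-major linearization of the grid that both programs traverse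
def pvXs (t : List (List Int)) : List Int :=
  (PySem.List.pyRange 0 (t.length : Int) 1).flatMap
    (fun c => t.map (fun row => PySem.List.pyGetD row c 0))

lemma pvFlatLen (N : Nat) (cols : List (List Int)) (hc : ∀ c ∈ cols, c.length = N) :
    (cols.flatMap id).length = cols.length * N := by
  induction cols with
  | nil => simp
  | cons col rest ih =>
    simp only [List.flatMap_cons, List.length_append, id, ih (fun c h => hc c (by simp [h])),
      List.length_cons, hc col (by simp)]
    ring

lemma pvFlat (N : Nat) (cols : List (List Int)) (hc : ∀ c ∈ cols, c.length = N)
    (k : Int) (h0 : 0 ≤ k) (hk : k < (cols.length : Int) * N) :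
    PySem.List.pyGetD (cols.flatMap id) k 0
    = PySem.List.pyGetD (PySem.List.pyGetD cols (PySem.Int.floordiv k N) [])
        (PySem.Int.mod k N) 0 := by
  have hN : (0:Int) < N := by
    rcases Nat.eq_zero_or_pos N with h | h
    · subst h; simp at hk; omega
    · exact_mod_cast h
  rw [PySem.Int.floordiv_eq_ediv_of_pos hN, PySem.Int.mod_eq_emod_of_pos hN]
  induction cols generalizing k with
  | nil => simp at hk; omega
  | cons col rest ih =>
    have hcol : col.length = N := hc col (by simp)
    have hrc : ∀ c ∈ rest, c.length = N := fun c h => hc c (by simp [h])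
    have hflen : (rest.flatMap id).length = rest.length * N := pvFlatLen N rest hrc
    have hkN : k < (N : Int) + (rest.length : Int) * N := by
      simp only [List.length_cons] at hk; push_cast at hk; nlinarith
    simp only [List.flatMap_cons, id]
    by_cases hsm : k < (N : Int)
    · have hfd : k / (N : Int) = 0 := Int.ediv_eq_zero_of_lt h0 hsm
      have hmod : k % (N : Int) = k := Int.emod_eq_of_lt h0 hsm
      rw [hfd, hmod, PySem.List.pyGetD_zero_cons]
      rw [PySem.List.pyGetD_eq_getElem _ 0 h0
            (by simp only [List.length_append, hcol, hflen]; push_cast; omega),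
          PySem.List.pyGetD_eq_getElem _ 0 h0 (by rw [hcol]; exact hsm)]
      exact List.getElem_append_left (by omega)
    · push_neg at hsm
      have hk2 : k - N < (rest.length : Int) * N := by omega
      have h02 : 0 ≤ k - N := by omega
      have hfd : k / (N : Int) = (k - N) / N + 1 := by
        have h := Int.add_mul_ediv_right (k - N) 1 (by omega : (N:Int) ≠ 0)
        rw [one_mul, Int.sub_add_cancel] at h
        exact h.symm ▸ rfl
      have hmod : k % (N : Int) = (k - N) % N := by
        have h := Int.add_mul_emod_self_right (k - N) 1 N
        rw [one_mul, Int.sub_add_cancel] at h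
        exact h
      rw [hfd, hmod]
      have hq : (0:Int) ≤ (k - N) / N := Int.ediv_nonneg h02 (by omega)
      obtain ⟨m, hm⟩ : ∃ m : Nat, (k - (N:Int)) / (N:Int) = (m:Int) :=
        ⟨((k - (N:Int)) / (N:Int)).toNat, by omega⟩
      have hcons : PySem.List.pyGetD (col :: rest) ((k - N) / (N:Int) + 1) []
          = PySem.List.pyGetD rest ((k - N) / (N:Int)) [] := by
        rw [hm, show ((m:Int) + 1) = ((m + 1 : Nat) : Int) by push_cast; ring,
            PySem.List.pyGetD_natCast, PySem.List.pyGetD_natCast, List.getD_cons_succ]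
      rw [hcons, ← ih hrc (k - N) h02 hk2]
      rw [PySem.List.pyGetD_eq_getElem _ 0 h0
            (by simp only [List.length_append, hcol, hflen]; push_cast; omega),
          PySem.List.pyGetD_eq_getElem _ 0 h02 (by rw [hflen]; push_cast; omega)]
      rw [List.getElem_append_right (by omega)]
      congr 1
      omega

lemma pvXs_length (t : List (List Int)) : (pvXs t).length = t.length * t.length := by
  simp [pvXs, List.length_flatMap, PySem.List.length_pyRange_one]

lemma pvAccess (t : List (List Int)) (k : Int) (h0 : 0 ≤ k)
    (hk : k < (t.length : Int) * (t.length : Int)) :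
    PySem.List.pyGetD (PySem.List.pyGetD t (PySem.Int.mod k (t.length : Int)) [])
      (PySem.Int.floordiv k (t.length : Int)) 0 = PySem.List.pyGetD (pvXs t) k 0 := by
  have hN : (0:Int) < (t.length : Int) := by nlinarith
  have hcols : pvXs t = ((PySem.List.pyRange 0 (t.length : Int) 1).map
      (fun c => t.map (fun row => PySem.List.pyGetD row c 0))).flatMap id := by
    rw [pvXs, List.flatMap_map]
    rfl
  have hc : ∀ c ∈ (PySem.List.pyRange 0 (t.length : Int) 1).map
      (fun c => t.map (fun row => PySem.List.pyGetD row c 0)), c.length = t.length := by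
    intro c hcm
    obtain ⟨i, _, rfl⟩ := List.mem_map.mp hcm
    simp
  have hlen : (((PySem.List.pyRange 0 (t.length : Int) 1).map
      (fun c => t.map (fun row => PySem.List.pyGetD row c 0))).length : Int)
      = (t.length : Int) := by
    simp [PySem.List.length_pyRange_one]
  rw [hcols, pvFlat t.length _ hc k h0 (by rw [hlen]; exact hk)]
  have hfd0 : 0 ≤ PySem.Int.floordiv k t.length := by
    rw [PySem.Int.floordiv_eq_ediv_of_pos hN]; exact Int.ediv_nonneg h0 (by omega)
  have hfdlt : PySem.Int.floordiv k t.length < (t.length : Int) := by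
    rw [PySem.Int.floordiv_eq_ediv_of_pos hN]
    exact Int.ediv_lt_of_lt_mul hN (by linarith [mul_comm (t.length:Int) (t.length:Int)])
  have hm0 : 0 ≤ PySem.Int.mod k t.length := PySem.Int.mod_nonneg k hN
  have hmlt : PySem.Int.mod k t.length < (t.length : Int) := PySem.Int.mod_lt k hN
  rw [PySem.List.pyGetD_map_pyRange_of_nonneg _ _ _ _ hfd0 hfdlt]
  rw [PySem.List.pyGetD_eq_getElem _ 0 hm0 (by simpa using hmlt), List.getElem_map]
  congr 1
  exact PySem.List.pyGetD_eq_getElem _ [] hm0 (by simpa using hmlt)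

lemma pvBrute_append (n : Int) (p : List Int) (x : Int) :
    pvBrute n (p ++ [x]) = pvBrute n p + (p.countP (fun y => decide (y * x = n)) : Int) := by
  induction p with
  | nil => simp [pvBrute]
  | cons a p ih =>
    simp only [List.cons_append, pvBrute, ih, List.countP_append, List.countP_cons,
      List.countP_nil]
    push_cast
    ring

lemma pvSum_brute' (n : Int) (xs : List Int) :
    ((List.range xs.length).map (fun k =>
      ((xs.drop (k + 1)).countP (fun y => decide (xs.getD k 0 * y = n)) : Int))).sum
    = pvBrute n xs := by
  induction xs with
  | nil => simp [pvBrute]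
  | cons x zs ih =>
    rw [List.length_cons, List.range_succ_eq_map]
    simp only [List.map_cons, List.map_map, List.sum_cons, List.drop_succ_cons,
      List.getD_cons_zero, List.drop_zero, Function.comp_def, List.getD_cons_succ]
    rw [ih, pvBrute]

lemma pvSum_brute (n : Int) (xs : List Int) :
    ((List.range (xs.length - 1)).map (fun k =>
      ((xs.drop (k + 1)).countP (fun y => decide (xs.getD k 0 * y = n)) : Int))).sum
    = pvBrute n xs := by
  rw [← pvSum_brute' n xs]
  match hx : xs.length with
  | 0 => simp
  | m + 1 =>
    rw [Nat.add_sub_cancel, List.range_succ, List.map_append, List.sum_append]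
    have : xs.drop (m + 1) = [] := List.drop_of_length_le (by omega)
    simp [this]

lemma pvDelta (n x : Int) (p : List Int) :
    (if x = 0 then (if n = 0 then (p.length : Int) else 0)
     else if PySem.Int.mod n x = 0 then (p.count (PySem.Int.floordiv n x) : Int) else 0)
    = (p.countP (fun y => decide (y * x = n)) : Int) := by
  by_cases hx : x = 0
  · subst hx
    by_cases hn : n = 0
    · subst hn; simp [List.countP_true, List.length]
    · simp [hn, Ne.symm hn, List.countP_eq_zero]
  · rw [if_neg hx]
    by_cases hm : PySem.Int.mod n x = 0
    · rw [if_pos hm]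
      have hdvd : x ∣ n := (PySem.Int.mod_eq_zero_iff_dvd n x).mp hm
      have hqx : PySem.Int.floordiv n x * x = n := by
        have := PySem.Int.floordiv_mul_add_mod n x
        omega
      rw [List.count_eq_countP]
      congr 1
      apply List.countP_congr
      intro y _
      have hiff : (y = PySem.Int.floordiv n x) ↔ (y * x = n) := by
        constructor
        · rintro rfl; exact hqx
        · intro h; exact mul_right_cancel₀ hx (h.trans hqx.symm)
      simp [hiff]
    · rw [if_neg hm]
      symm
      norm_cast
      rw [List.countP_eq_zero]
      intro y _ hy
      exact hm ((PySem.Int.mod_eq_zero_iff_dvd n x).mpr ⟨y, by simpa [mul_comm] using (of_decide_eq_true hy).symm⟩)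

lemma pvStep_inv (n : Int) (p : List Int) (x : Int) :
    pvStep n (pvBrute n p, (p.length : Int),
        p.foldl (fun d x => d.insert x (d.getD x 0 + 1)) PySem.Dict.empty) x
    = (pvBrute n (p ++ [x]), ((p ++ [x]).length : Int),
        (p ++ [x]).foldl (fun d x => d.insert x (d.getD x 0 + 1)) PySem.Dict.empty) := by
  have hget : ∀ v : Int, (p.foldl (fun d x => d.insert x (d.getD x 0 + 1)) PySem.Dict.empty).getD v 0
      = (p.count v : Int) := by
    intro v
    rw [PySem.Dict.getD_foldl_insert_add_one, PySem.Dict.getD_empty, zero_add]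
  simp only [pvStep, pvBrute_append, hget, List.foldl_append, List.foldl_cons, List.foldl_nil,
    List.length_append, List.length_cons, List.length_nil]
  refine Prod.ext ?_ (Prod.ext (by push_cast; ring) rfl)
  simp only [← pvDelta n x p]
  by_cases hx : x = 0 <;> by_cases hn : n = 0 <;>
    by_cases hm : PySem.Int.mod n x = 0 <;> simp [hx, hn, hm] <;> split_ifs <;> ring

lemma pvLoop_inv (n : Int) (ys : List Int) : ∀ p : List Int,
    ys.foldl (pvStep n) (pvBrute n p, (p.length : Int),
        p.foldl (fun d x => d.insert x (d.getD x 0 + 1)) PySem.Dict.empty)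
    = (pvBrute n (p ++ ys), ((p ++ ys).length : Int),
        (p ++ ys).foldl (fun d x => d.insert x (d.getD x 0 + 1)) PySem.Dict.empty) := by
  induction ys with
  | nil => intro p; simp
  | cons x ys ih =>
    intro p
    simp only [List.foldl_cons, pvStep_inv]
    simpa [List.append_assoc] using ih (p ++ [x])

lemma pvTerm (n : Int) (t : List (List Int)) (k : Nat) (hk : k < t.length * t.length - 1) :
    ((PySem.List.pyRange ((k : Int) + 1) ((t.length : Int) * (t.length : Int)) 1).countP
       (fun j => decide (PySem.List.pyGetD (PySem.List.pyGetD t (PySem.Int.mod (k : Int) (t.length : Int)) []) (PySem.Int.floordiv (k : Int) (t.length : Int)) 0 *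
          PySem.List.pyGetD (PySem.List.pyGetD t (PySem.Int.mod j (t.length : Int)) []) (PySem.Int.floordiv j (t.length : Int)) 0 = n)) : Int)
    = (((pvXs t).drop (k + 1)).countP (fun y => decide ((pvXs t).getD k 0 * y = n)) : Int) := by
  have hM : ((pvXs t).length : Int) = (t.length : Int) * (t.length : Int) := by
    rw [pvXs_length]; push_cast; ring
  have hkM : ((k : Int)) < (t.length : Int) * (t.length : Int) := by push_cast; omega
  have hcongr : (PySem.List.pyRange ((k : Int) + 1) ((t.length : Int) * (t.length : Int)) 1).countP
      (fun j => decide (PySem.List.pyGetD (PySem.List.pyGetD t (PySem.Int.mod (k : Int) (t.length : Int)) []) (PySem.Int.floordiv (k : Int) (t.length : Int)) 0 *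
         PySem.List.pyGetD (PySem.List.pyGetD t (PySem.Int.mod j (t.length : Int)) []) (PySem.Int.floordiv j (t.length : Int)) 0 = n))
      = (PySem.List.pyRange ((k : Int) + 1) ((t.length : Int) * (t.length : Int)) 1).countP
      (fun j => decide (PySem.List.pyGetD (pvXs t) (k : Int) 0 * PySem.List.pyGetD (pvXs t) j 0 = n)) := by
    apply List.countP_congr
    intro j hj
    rw [PySem.List.mem_pyRange_one] at hj
    rw [pvAccess t k (by omega) hkM, pvAccess t j (by omega) (hj.2)]
  rw [hcongr]
  have hmap : (PySem.List.pyRange ((k : Int) + 1) ((t.length : Int) * (t.length : Int)) 1).countP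
      (fun j => decide (PySem.List.pyGetD (pvXs t) (k : Int) 0 * PySem.List.pyGetD (pvXs t) j 0 = n))
      = (((pvXs t).drop (k + 1)).countP (fun y => decide (PySem.List.pyGetD (pvXs t) (k : Int) 0 * y = n))) := by
    conv_rhs => rw [show k + 1 = (((k + 1 : Nat) : Int)).toNat by simp,
      ← PySem.List.map_pyGetD_pyRange' (pvXs t) 0 (a := ((k + 1 : Nat) : Int)) (by omega)]
    rw [List.countP_map]
    rw [show ((k : Int) + 1) = ((k + 1 : Nat) : Int) by push_cast; ring, ← hM]
    rfl
  rw [hmap]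
  simp [PySem.List.pyGetD_natCast]

lemma pvA_eq (n : Int) (t : List (List Int)) : licz_pary n t = pvBrute n (pvXs t) := by
  simp only [licz_pary, PySem.List.len_eq]
  change (PySem.List.pyRange 0 ((t.length : Int) * (t.length : Int) - 1) 1).foldl
      (fun cnt i => (PySem.List.pyRange (i + 1) ((t.length : Int) * (t.length : Int)) 1).foldl
        (fun cnt j => if PySem.List.pyGetD (PySem.List.pyGetD t (PySem.Int.mod i (t.length : Int)) []) (PySem.Int.floordiv i (t.length : Int)) 0 *
            PySem.List.pyGetD (PySem.List.pyGetD t (PySem.Int.mod j (t.length : Int)) []) (PySem.Int.floordiv j (t.length : Int)) 0 = n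
          then cnt + 1 else cnt) cnt) 0 = pvBrute n (pvXs t)
  have hfn : ∀ (cnt : Int) (i : Int),
      (PySem.List.pyRange (i + 1) ((t.length : Int) * (t.length : Int)) 1).foldl
        (fun cnt j => if PySem.List.pyGetD (PySem.List.pyGetD t (PySem.Int.mod i (t.length : Int)) []) (PySem.Int.floordiv i (t.length : Int)) 0 *
            PySem.List.pyGetD (PySem.List.pyGetD t (PySem.Int.mod j (t.length : Int)) []) (PySem.Int.floordiv j (t.length : Int)) 0 = n
          then cnt + 1 else cnt) cnt
      = cnt + ((PySem.List.pyRange (i + 1) ((t.length : Int) * (t.length : Int)) 1).countP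
          (fun j => decide (PySem.List.pyGetD (PySem.List.pyGetD t (PySem.Int.mod i (t.length : Int)) []) (PySem.Int.floordiv i (t.length : Int)) 0 *
            PySem.List.pyGetD (PySem.List.pyGetD t (PySem.Int.mod j (t.length : Int)) []) (PySem.Int.floordiv j (t.length : Int)) 0 = n)) : Int) :=
    fun cnt i => PySem.List.foldl_ite_add_one _ _ cnt
  rw [PySem.List.foldl_congr_mem _ _
      (fun (cnt : Int) (i : Int) => cnt + ((PySem.List.pyRange (i + 1) ((t.length : Int) * (t.length : Int)) 1).countP
          (fun j => decide (PySem.List.pyGetD (PySem.List.pyGetD t (PySem.Int.mod i (t.length : Int)) []) (PySem.Int.floordiv i (t.length : Int)) 0 *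
            PySem.List.pyGetD (PySem.List.pyGetD t (PySem.Int.mod j (t.length : Int)) []) (PySem.Int.floordiv j (t.length : Int)) 0 = n)) : Int))
      0 (fun cnt i _ => hfn cnt i)]
  rw [PySem.List.foldl_add]
  rcases Nat.eq_zero_or_pos t.length with hL | hL
  · rw [PySem.List.pyRange_one_eq_nil (by simp [hL])]
    have : pvXs t = [] := by
      have := pvXs_length t
      rw [hL] at this
      simpa using List.eq_nil_of_length_eq_zero (by simpa using this)
    simp [this, pvBrute]
  · have h1 : 1 ≤ t.length * t.length := Nat.mul_pos hL hL
    rw [show ((t.length : Int) * (t.length : Int) - 1) = ((t.length * t.length - 1 : Nat) : Int) by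
        rw [Nat.cast_sub h1]; push_cast; ring]
    rw [PySem.List.pyRange_zero_natCast, List.map_map]
    rw [← pvSum_brute n (pvXs t), pvXs_length]
    rw [zero_add]
    apply congrArg
    apply List.map_congr_left
    intro k hk
    rw [List.mem_range] at hk
    simpa using pvTerm n t k hk

lemma pvB_eq (n : Int) (t : List (List Int)) (h : 2 ≤ t.length) :
    licz_pary_alt n t = pvBrute n (pvXs t) := by
  simp only [licz_pary_alt, PySem.List.len_eq]
  rw [if_neg (by exact_mod_cast not_lt.mpr (by exact_mod_cast h))]
  have hinner : (fun (st : Int × Int × PySem.Dict Int Int) (c : Int) =>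
      (PySem.List.pyRange 0 (t.length : Int) 1).foldl (fun st r =>
        pvStep n st (PySem.List.pyGetD (PySem.List.pyGetD t r []) c 0)) st)
      = (fun st c => (t.map (fun row => PySem.List.pyGetD row c 0)).foldl (pvStep n) st) := by
    funext st c
    rw [PySem.List.foldl_pyRange_zero_pyGetD' t []
      (fun st row => pvStep n st (PySem.List.pyGetD row c 0)) st, List.foldl_map]
  rw [hinner, ← List.foldl_flatMap, ← pvXs]
  have := pvLoop_inv n (pvXs t) []
  simp only [List.nil_append, List.length_nil, List.foldl_nil, Nat.cast_zero] at this
  rw [show (pvBrute n [] : Int) = 0 from rfl] at this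
  rw [this]

-- ===== VERDICT (by name: the statement is the Claim_ definition above) =====
theorem licz_pary_spec : Claim_equal_licz_pary := by
  intro n t _ _
  unfold Spec_licz_pary
  by_cases h : 2 ≤ t.length
  · rw [pvA_eq, pvB_eq n t h]
  · rw [pvA_eq]
    have hx : pvXs t = [] ∨ ∃ a, pvXs t = [a] := by
      have := pvXs_length t
      interval_cases ht : t.length
      · left; simpa [ht] using this
      · right
        simp only [ht, Nat.mul_one] at this
        match hxe : pvXs t with
        | [] => simp [hxe] at this
        | [a] => exact ⟨a, rfl⟩
        | a :: b :: l => simp [hxe] at this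
    have hB : licz_pary_alt n t = 0 := by
      simp only [licz_pary_alt, PySem.List.len_eq]
      rw [if_pos (by exact_mod_cast by omega)]
    rcases hx with hx | ⟨a, hx⟩ <;> simp [hx, hB, pvBrute]
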